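-- pv_equiv track=rewrite | github.com/jomidiaz08/Juego-Laberinto-_-Proyecto-Integrador | main.py | encontrar_posiciones_inicio_y_fin
-- ===== SOURCE A (Python) =====
-- def encontrar_posiciones_inicio_y_fin(matriz_maze):
--     for i in range(len(matriz_maze)):
--         for j in range(len(matriz_maze[i])):
--             if matriz_maze[i][j] == "P":
--                 posicion_inicio = (i, j)
--             elif matriz_maze[i][j] == ".":
--                 posicion_fin = (i, j)
--     return posicion_inicio, posicion_fin
-- ===== SOURCE B (Python) =====
-- def encontrar_posiciones_inicio_y_fin(matriz_maze):
--     def buscar_ultima(ch):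
--         for i in range(len(matriz_maze) - 1, -1, -1):
--             fila = matriz_maze[i]
--             for j in range(len(fila) - 1, -1, -1):
--                 if fila[j] == ch:
--                     return (i, j)
--     posicion_inicio = buscar_ultima("P")
--     posicion_fin = buscar_ultima(".")
--     return posicion_inicio, posicion_fin
-- ===== Notes on version B (the rewrite author's own statement) =====
-- stated objective: alternative
-- what changed: Replaces the single forward pass that keeps overwriting both positions with two independent reverse scans that each stop at the first match (= last match in row-major order).
import Mathlib
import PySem

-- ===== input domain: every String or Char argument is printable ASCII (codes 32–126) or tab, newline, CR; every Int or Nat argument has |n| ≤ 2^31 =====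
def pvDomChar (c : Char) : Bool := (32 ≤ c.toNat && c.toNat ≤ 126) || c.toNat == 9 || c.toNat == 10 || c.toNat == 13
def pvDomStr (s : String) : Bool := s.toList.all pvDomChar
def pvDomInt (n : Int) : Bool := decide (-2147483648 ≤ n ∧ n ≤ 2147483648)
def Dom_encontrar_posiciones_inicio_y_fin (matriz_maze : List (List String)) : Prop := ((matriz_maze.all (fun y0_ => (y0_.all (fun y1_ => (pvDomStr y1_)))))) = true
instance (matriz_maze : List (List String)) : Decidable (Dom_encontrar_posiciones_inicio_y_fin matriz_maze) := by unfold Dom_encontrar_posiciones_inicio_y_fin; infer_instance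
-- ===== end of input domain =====

-- B replaces A's single forward overwriting pass by two independent reverse scans that stop
-- at the first match; return values proven equal wherever A returns (Pre_: both "P" and "." occur).

-- ===== PORT A =====
-- single forward pass; both positions tracked as Options (none = variable unbound; A raises there, excluded by Pre_)
def encontrar_posiciones_inicio_y_fin (matriz_maze : List (List String)) : (Int × Int) × (Int × Int) :=
  let st : Option (Int × Int) × Option (Int × Int) :=
    (PySem.List.enumerate matriz_maze).foldl (fun st row =>
      (PySem.List.enumerate row.2).foldl (fun st cell =>
        if cell.2 == "P" then (some (row.1, cell.1), st.2)
        else if cell.2 == "." then (st.1, some (row.1, cell.1))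
        else st) st) (none, none)
  (st.1.getD (-1, -1), st.2.getD (-1, -1))

-- ===== PORT B =====
-- reverse scan of one row (cells already reversed), first match wins
def pvScanRow (i : Int) (cells : List (Int × String)) (ch : String) : Option (Int × Int) :=
  match cells with
  | [] => none
  | c :: rest => if c.2 == ch then some (i, c.1) else pvScanRow i rest ch

-- reverse scan over rows (rows already reversed)
def pvScanRows (rows : List (Int × List String)) (ch : String) : Option (Int × Int) :=
  match rows with
  | [] => none
  | r :: rest =>
    match pvScanRow r.1 (PySem.List.enumerate r.2).reverse ch with
    | some v => some v
    | none => pvScanRows rest ch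

def encontrar_posiciones_inicio_y_fin_alt (matriz_maze : List (List String)) : (Int × Int) × (Int × Int) :=
  let rows := (PySem.List.enumerate matriz_maze).reverse
  ((pvScanRows rows "P").getD (-1, -1), (pvScanRows rows ".").getD (-1, -1))

-- ===== PRECONDITION & SPEC =====
-- Pre_ excludes exactly the inputs with no "P" or no "." cell, on which A raises UnboundLocalError.
def Pre_encontrar_posiciones_inicio_y_fin (matriz_maze : List (List String)) : Prop :=
  (∃ row ∈ matriz_maze, "P" ∈ row) ∧ (∃ row ∈ matriz_maze, "." ∈ row)
instance (matriz_maze : List (List String)) : Decidable (Pre_encontrar_posiciones_inicio_y_fin matriz_maze) := by unfold Pre_encontrar_posiciones_inicio_y_fin; infer_instance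
def pvWitness_encontrar_posiciones_inicio_y_fin : List (List String) := [["#", "P"], [".", "#"]]

def Spec_encontrar_posiciones_inicio_y_fin (matriz_maze : List (List String)) (out : (Int × Int) × (Int × Int)) : Prop := out = encontrar_posiciones_inicio_y_fin_alt matriz_maze
instance (matriz_maze : List (List String)) (out : (Int × Int) × (Int × Int)) : Decidable (Spec_encontrar_posiciones_inicio_y_fin matriz_maze out) := by unfold Spec_encontrar_posiciones_inicio_y_fin; infer_instance

-- ===== CLAIM (what is proved, stated in full; the proofs are below) =====
def Claim_equal_encontrar_posiciones_inicio_y_fin : Prop := ∀ (matriz_maze : List (List String)), Dom_encontrar_posiciones_inicio_y_fin matriz_maze → Pre_encontrar_posiciones_inicio_y_fin matriz_maze → Spec_encontrar_posiciones_inicio_y_fin matriz_maze (encontrar_posiciones_inicio_y_fin matriz_maze)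

-- ===== LEMMAS AND PROOFS =====

-- last-match accumulator over one row, one character
def pvRowLast (ch : String) (i : Int) (s0 : Option (Int × Int)) (cells : List (Int × String)) : Option (Int × Int) :=
  cells.foldl (fun s c => if c.2 == ch then some (i, c.1) else s) s0

theorem pvScanRow_append (i : Int) (l1 l2 : List (Int × String)) (ch : String) :
    pvScanRow i (l1 ++ l2) ch = (pvScanRow i l1 ch).or (pvScanRow i l2 ch) := by
  induction l1 with
  | nil => simp [pvScanRow]
  | cons c rest ih =>
    simp only [List.cons_append, pvScanRow]
    by_cases h : c.2 = ch <;> simp [h, ih, Option.or]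

theorem pvRowLast_eq (ch : String) (i : Int) (s0 : Option (Int × Int)) (cells : List (Int × String)) :
    pvRowLast ch i s0 cells = (pvScanRow i cells.reverse ch).or s0 := by
  induction cells generalizing s0 with
  | nil => simp [pvRowLast, pvScanRow]
  | cons c rest ih =>
    simp only [pvRowLast, List.foldl_cons, List.reverse_cons]
    rw [show (rest.foldl (fun s c => if c.2 == ch then some (i, c.1) else s)
        (if c.2 == ch then some (i, c.1) else s0)) = pvRowLast ch i
        (if c.2 == ch then some (i, c.1) else s0) rest from rfl, ih,
      pvScanRow_append]
    by_cases h : c.2 == ch <;>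
      cases hs : pvScanRow i rest.reverse ch <;> simp [h, pvScanRow, Option.or]

-- last-match accumulator over rows
def pvLast (ch : String) (s0 : Option (Int × Int)) (rows : List (Int × List String)) : Option (Int × Int) :=
  rows.foldl (fun s r => pvRowLast ch r.1 s (PySem.List.enumerate r.2)) s0

theorem pvScanRows_append (l1 l2 : List (Int × List String)) (ch : String) :
    pvScanRows (l1 ++ l2) ch = (pvScanRows l1 ch).or (pvScanRows l2 ch) := by
  induction l1 with
  | nil => simp [pvScanRows]
  | cons r rest ih =>
    simp only [List.cons_append, pvScanRows]
    cases h : pvScanRow r.1 (PySem.List.enumerate r.2).reverse ch <;> simp [ih, Option.or]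

theorem pvLast_eq (ch : String) (s0 : Option (Int × Int)) (rows : List (Int × List String)) :
    pvLast ch s0 rows = (pvScanRows rows.reverse ch).or s0 := by
  induction rows generalizing s0 with
  | nil => simp [pvLast, pvScanRows]
  | cons r rest ih =>
    simp only [pvLast, List.foldl_cons, List.reverse_cons]
    rw [show (rest.foldl (fun s r => pvRowLast ch r.1 s (PySem.List.enumerate r.2))
        (pvRowLast ch r.1 s0 (PySem.List.enumerate r.2))) = pvLast ch
        (pvRowLast ch r.1 s0 (PySem.List.enumerate r.2)) rest from rfl, ih,
      pvScanRows_append, pvRowLast_eq]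
    cases hs : pvScanRows rest.reverse ch <;>
      cases hr : pvScanRow r.1 (PySem.List.enumerate r.2).reverse ch <;>
        simp [pvScanRows, hr, Option.or]

-- A's pair-state inner fold splits into two independent pvRowLast folds
theorem inner_split (i : Int) (cells : List (Int × String)) (st : Option (Int × Int) × Option (Int × Int)) :
    cells.foldl (fun st cell =>
        if cell.2 == "P" then (some (i, cell.1), st.2)
        else if cell.2 == "." then (st.1, some (i, cell.1))
        else st) st
      = (pvRowLast "P" i st.1 cells, pvRowLast "." i st.2 cells) := by
  induction cells generalizing st with
  | nil => simp [pvRowLast]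
  | cons c rest ih =>
    simp only [List.foldl_cons, pvRowLast]
    rw [ih]
    by_cases hP : c.2 == "P"
    · have hc := eq_of_beq hP
      simp [pvRowLast, hc]
    · by_cases hQ : c.2 == "." <;> simp [pvRowLast, hP, hQ]

-- A's pair-state outer fold splits into two independent pvLast folds
theorem outer_split (rows : List (Int × List String)) (st : Option (Int × Int) × Option (Int × Int)) :
    rows.foldl (fun st row =>
        (PySem.List.enumerate row.2).foldl (fun st cell =>
          if cell.2 == "P" then (some (row.1, cell.1), st.2)
          else if cell.2 == "." then (st.1, some (row.1, cell.1))
          else st) st) st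
      = (pvLast "P" st.1 rows, pvLast "." st.2 rows) := by
  induction rows generalizing st with
  | nil => simp [pvLast]
  | cons r rest ih =>
    simp only [List.foldl_cons, pvLast]
    rw [inner_split, ih]
    simp [pvLast]

-- ===== VERDICT (by name: the statement is the Claim_ definition above) =====
theorem encontrar_posiciones_inicio_y_fin_spec : Claim_equal_encontrar_posiciones_inicio_y_fin := by
  intro m _ _
  unfold Spec_encontrar_posiciones_inicio_y_fin
  unfold encontrar_posiciones_inicio_y_fin encontrar_posiciones_inicio_y_fin_alt
  simp only [outer_split, pvLast_eq]
  cases pvScanRows (PySem.List.enumerate m).reverse "P" <;>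
    cases pvScanRows (PySem.List.enumerate m).reverse "." <;> simp
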